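-- pv_equiv track=rewrite | github.com/guillaumekey/ai-analyzer | utils/competitor_detection.py | is_same_brand
-- ===== SOURCE A (Python) =====
-- def is_same_brand(candidate: str, brand_name: str) -> bool:
--     """Check if candidate is the same as the brand being analyzed"""
--     # Normalize for comparison
--     candidate_normalized = candidate.lower().strip()
--     brand_normalized = brand_name.lower().strip()
--
--     # Exact match
--     if candidate_normalized == brand_normalized:
--         return True
--
--     # Check without common suffixes
--     suffixes = [' inc', ' inc.', ' corp', ' corp.', ' ltd', ' ltd.', ' llc', ' co', ' co.', ' company']
--     for suffix in suffixes:
--         if candidate_normalized.endswith(suffix):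
--             candidate_base = candidate_normalized[:-len(suffix)].strip()
--             if candidate_base == brand_normalized:
--                 return True
--         if brand_normalized.endswith(suffix):
--             brand_base = brand_normalized[:-len(suffix)].strip()
--             if candidate_normalized == brand_base:
--                 return True
--
--     return False
-- ===== SOURCE B (Python) =====
-- _CORES = ('inc', 'inc.', 'corp', 'corp.', 'ltd', 'ltd.', 'llc', 'co', 'co.', 'company')
--
--
-- def _strips_to(longer: str, shorter: str) -> bool:
--     """Does `longer` read as `shorter` + whitespace + ' ' + one legal suffix core?"""
--     if not longer.startswith(shorter):
--         return False
--     rest = longer[len(shorter):]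
--     for core in _CORES:
--         k = len(rest) - len(core) - 1
--         if k >= 0 and rest.endswith(core) and rest[k] == ' ' and rest[:k].strip() == '':
--             return True
--     return False
--
--
-- def is_same_brand(candidate: str, brand_name: str) -> bool:
--     c = candidate.lower().strip()
--     b = brand_name.lower().strip()
--     return c == b or _strips_to(c, b) or _strips_to(b, c)
-- ===== Notes on version B (the rewrite author's own statement) =====
-- stated objective: alternative
-- what changed: Instead of enumerating the suffix list and stripping each matching suffix off one side before comparing, B tests whether one normalized string is a prefix of the other and then analyzes only the leftover tail, accepting it exactly when it is whitespace followed by a space and a known suffix core.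
import Mathlib
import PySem

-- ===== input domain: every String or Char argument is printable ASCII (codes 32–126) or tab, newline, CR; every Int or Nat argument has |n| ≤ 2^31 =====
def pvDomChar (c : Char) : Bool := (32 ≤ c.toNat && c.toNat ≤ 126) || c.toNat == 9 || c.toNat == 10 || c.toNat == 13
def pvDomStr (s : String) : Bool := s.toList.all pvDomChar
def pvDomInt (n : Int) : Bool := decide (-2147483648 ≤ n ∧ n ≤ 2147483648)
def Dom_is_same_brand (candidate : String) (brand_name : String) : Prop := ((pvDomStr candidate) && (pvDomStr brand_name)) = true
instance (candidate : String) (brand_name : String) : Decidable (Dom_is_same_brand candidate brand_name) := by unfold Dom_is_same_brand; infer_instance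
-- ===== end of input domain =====

-- B replaces A's enumerate-suffixes-and-strip loop by a prefix test plus an
-- analysis of the remaining tail (whitespace + ' ' + a known suffix core)
-- (objective: alternative).

-- ===== PORT A =====
def pvSuffixes : List (List Char) :=
  [" inc".toList, " inc.".toList, " corp".toList, " corp.".toList, " ltd".toList,
   " ltd.".toList, " llc".toList, " co".toList, " co.".toList, " company".toList]

def pvLoopA (c b : List Char) : List (List Char) → Bool
  | [] => false
  | suf :: rest =>
    if PySem.Chars.endswith c suf
        && (PySem.Chars.strip (PySem.List.slice c none (some (-(suf.length : Int)))) == b) then true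
    else if PySem.Chars.endswith b suf
        && (PySem.Chars.strip (PySem.List.slice b none (some (-(suf.length : Int)))) == c) then true
    else pvLoopA c b rest

def is_same_brand (candidate : String) (brand_name : String) : Bool :=
  let c := PySem.Chars.strip (PySem.Chars.lower candidate.toList)
  let b := PySem.Chars.strip (PySem.Chars.lower brand_name.toList)
  if c == b then true
  else pvLoopA c b pvSuffixes

-- ===== PORT B =====
def pvCores : List (List Char) :=
  ["inc".toList, "inc.".toList, "corp".toList, "corp.".toList, "ltd".toList,
   "ltd.".toList, "llc".toList, "co".toList, "co.".toList, "company".toList]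

-- one iteration of B's loop over cores: rest == whitespace* ++ ' ' ++ core ?
def pvCoreHit (rest core : List Char) : Bool :=
  let k : Int := (rest.length : Int) - (core.length : Int) - 1
  decide (0 ≤ k) && PySem.Chars.endswith rest core
    && (PySem.List.pyGet? rest k == some ' ')
    && (PySem.Chars.strip (PySem.List.slice rest none (some k)) == [])

def pvStripsTo (longer shorter : List Char) : Bool :=
  if PySem.Chars.startswith longer shorter then
    pvCores.any (pvCoreHit (PySem.List.slice longer (some (shorter.length : Int)) none))
  else false

def is_same_brand_alt (candidate : String) (brand_name : String) : Bool :=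
  let c := PySem.Chars.strip (PySem.Chars.lower candidate.toList)
  let b := PySem.Chars.strip (PySem.Chars.lower brand_name.toList)
  c == b || pvStripsTo c b || pvStripsTo b c

-- ===== PRECONDITION & SPEC =====
def Spec_is_same_brand (candidate : String) (brand_name : String) (out : Bool) : Prop := out = is_same_brand_alt candidate brand_name
instance (candidate : String) (brand_name : String) (out : Bool) : Decidable (Spec_is_same_brand candidate brand_name out) := by unfold Spec_is_same_brand; infer_instance

-- ===== CLAIM (what is proved, stated in full; the proofs are below) =====
def Claim_equal_is_same_brand : Prop := ∀ (candidate : String) (brand_name : String), Dom_is_same_brand candidate brand_name → Spec_is_same_brand candidate brand_name (is_same_brand candidate brand_name)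

-- ===== LEMMAS AND PROOFS =====

lemma pv_lstrip_of_strip (l : List Char) (h : PySem.Chars.strip l = l) :
    PySem.Chars.lstrip l = l := by
  have hs : PySem.Chars.lstrip l <:+ l := List.dropWhile_suffix _
  have h1 : (PySem.Chars.strip l).length ≤ (PySem.Chars.lstrip l).length := by
    simpa [PySem.Chars.strip, PySem.Chars.rstrip] using
      List.length_dropWhile_le PySem.Chars.isspace (PySem.Chars.lstrip l).reverse
  have h2 : (PySem.Chars.lstrip l).length ≤ l.length := List.length_dropWhile_le _ _
  exact hs.eq_of_length (by rw [h] at h1; omega)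

lemma pv_rstrip_of_strip (l : List Char) (h : PySem.Chars.strip l = l) :
    PySem.Chars.rstrip l = l := by
  have := pv_lstrip_of_strip l h
  rwa [PySem.Chars.strip, this] at h

lemma pv_head_not_space (x : Char) (t : List Char) (h : PySem.Chars.lstrip (x :: t) = x :: t) :
    PySem.Chars.isspace x = false := by
  have := List.dropWhile_eq_self_iff.mp h (by simp)
  simpa using this

lemma pv_rstrip_decomp (p b : List Char) (h : PySem.Chars.rstrip p = b) :
    ∃ w, p = b ++ w ∧ w.all PySem.Chars.isspace := by
  refine ⟨(p.reverse.takeWhile PySem.Chars.isspace).reverse, ?_, ?_⟩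
  · have hd : p.reverse.dropWhile PySem.Chars.isspace = b.reverse := by
      rw [PySem.Chars.rstrip] at h
      rw [← h, List.reverse_reverse]
    have := List.takeWhile_append_dropWhile (p := PySem.Chars.isspace) (l := p.reverse)
    rw [hd] at this
    have := congrArg List.reverse this
    simpa using this.symm
  · simp only [List.all_eq_true, List.mem_reverse]
    exact fun x hx => List.mem_takeWhile_imp hx

lemma pv_strip_eq_nil_iff (l : List Char) :
    PySem.Chars.strip l = [] ↔ l.all PySem.Chars.isspace := by
  constructor
  · intro h
    rw [PySem.Chars.strip, PySem.Chars.rstrip] at h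
    have hd : (PySem.Chars.lstrip l).reverse.dropWhile PySem.Chars.isspace = [] := by
      have := congrArg List.reverse h; simpa using this
    have h2 : ∀ x ∈ (PySem.Chars.lstrip l).reverse, PySem.Chars.isspace x :=
      List.dropWhile_eq_nil_iff.mp hd
    have h3 : ∀ x ∈ PySem.Chars.lstrip l, PySem.Chars.isspace x := by
      intro x hx; exact h2 x (by simpa using hx)
    simp only [List.all_eq_true]
    intro x hx
    rcases List.mem_append.mp ((List.takeWhile_append_dropWhile (p := PySem.Chars.isspace) (l := l)) ▸ hx) with h4 | h4
    · exact List.mem_takeWhile_imp h4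
    · exact h3 x h4
  · intro h
    have hl : PySem.Chars.lstrip l = [] := by
      rw [PySem.Chars.lstrip, List.dropWhile_eq_nil_iff]
      intro x hx; exact (List.all_eq_true.mp h) x hx
    rw [PySem.Chars.strip, hl]; rfl

lemma pv_rstrip_append_ws (x w : List Char) (hw : w.all PySem.Chars.isspace) :
    PySem.Chars.rstrip (x ++ w) = PySem.Chars.rstrip x := by
  rw [PySem.Chars.rstrip, PySem.Chars.rstrip, List.reverse_append, List.dropWhile_append]
  have : w.reverse.dropWhile PySem.Chars.isspace = [] := by
    rw [List.dropWhile_eq_nil_iff]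
    intro y hy; exact (List.all_eq_true.mp hw) y (by simpa using hy)
  simp [this]

lemma pv_strip_append_ws (b w : List Char) (hb : PySem.Chars.strip b = b)
    (hw : w.all PySem.Chars.isspace) : PySem.Chars.strip (b ++ w) = b := by
  rcases b with _ | ⟨x, t⟩
  · simpa using (pv_strip_eq_nil_iff w).mpr hw
  · have hlb : PySem.Chars.lstrip (x :: t) = x :: t := pv_lstrip_of_strip _ hb
    have hx : PySem.Chars.isspace x = false := pv_head_not_space x t hlb
    have hl : PySem.Chars.lstrip ((x :: t) ++ w) = (x :: t) ++ w := by
      rw [PySem.Chars.lstrip, List.cons_append, List.dropWhile_cons_of_neg (by simp [hx])]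
    rw [PySem.Chars.strip, hl, pv_rstrip_append_ws _ _ hw]
    exact pv_rstrip_of_strip _ hb

lemma pv_dropWhile_idem (p : Char → Bool) (l : List Char) :
    (l.dropWhile p).dropWhile p = l.dropWhile p := by
  rw [List.dropWhile_eq_self_iff]
  intro hl hp
  have hne : l.dropWhile p ≠ [] := List.ne_nil_of_length_pos hl
  have h2 := List.head_dropWhile_not p hne
  rw [List.head_eq_getElem] at h2
  rw [hp] at h2; simp at h2

lemma pv_rstrip_idem (l : List Char) :
    PySem.Chars.rstrip (PySem.Chars.rstrip l) = PySem.Chars.rstrip l := by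
  rw [PySem.Chars.rstrip, PySem.Chars.rstrip, List.reverse_reverse, pv_dropWhile_idem]

lemma pv_strip_idem (l : List Char) :
    PySem.Chars.strip (PySem.Chars.strip l) = PySem.Chars.strip l := by
  have hls : PySem.Chars.lstrip (PySem.Chars.strip l) = PySem.Chars.strip l := by
    obtain ⟨w, hdec, hw⟩ := pv_rstrip_decomp (PySem.Chars.lstrip l) (PySem.Chars.strip l) rfl
    rcases hsl' : PySem.Chars.strip l with _ | ⟨x, t⟩
    · rfl
    · have hxl : PySem.Chars.lstrip l = x :: (t ++ w) := by rw [hdec, hsl']; simp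
      have h0 : PySem.Chars.lstrip (PySem.Chars.lstrip l) = PySem.Chars.lstrip l :=
        pv_dropWhile_idem _ _
      rw [hxl] at h0
      have hx : PySem.Chars.isspace x = false := pv_head_not_space _ _ h0
      rw [PySem.Chars.lstrip, List.dropWhile_cons_of_neg (by simp [hx])]
  conv_lhs => rw [PySem.Chars.strip]
  rw [hls]
  exact pv_rstrip_idem (PySem.Chars.lstrip l)
lemma pv_branch_eq (c b core : List Char)
    (hc : PySem.Chars.strip c = c) (hb : PySem.Chars.strip b = b) :
    (PySem.Chars.endswith c (' ' :: core)
      && (PySem.Chars.strip (PySem.List.slice c none (some (-((' ' :: core).length : Int)))) == b))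
    = (PySem.Chars.startswith c b
      && pvCoreHit (PySem.List.slice c (some (b.length : Int)) none) core) := by
  have hslA : PySem.List.slice c none (some (-(((' ' :: core).length : Nat) : Int)))
      = c.take (c.length - (core.length + 1)) := by
    simpa using PySem.List.slice_to_neg_natCast c (' ' :: core).length (by simp)
  have hslB : PySem.List.slice c (some ((b.length : Nat) : Int)) none = c.drop b.length :=
    PySem.List.slice_from_natCast c b.length
  rw [Bool.eq_iff_iff]
  simp only [Bool.and_eq_true, beq_iff_eq, PySem.Chars.endswith_iff, PySem.Chars.startswith_iff,
    hslA, hslB]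
  constructor
  · rintro ⟨⟨p, hp⟩, hstrip⟩
    have hclen : c.length = p.length + (core.length + 1) := by rw [← hp]; simp
    have htake : c.take (c.length - (core.length + 1)) = p := by
      rw [hclen, ← hp]
      simp
    rw [htake] at hstrip
    have hpne : p ≠ [] := by
      rintro rfl
      have h1 : PySem.Chars.lstrip c = c := pv_lstrip_of_strip c hc
      rw [← hp] at h1
      have := pv_head_not_space _ _ h1
      simp [PySem.Chars.isspace] at this
    obtain ⟨x, t, rfl⟩ := List.exists_cons_of_ne_nil hpne
    have hx : PySem.Chars.isspace x = false := by
      have h1 : PySem.Chars.lstrip c = c := pv_lstrip_of_strip c hc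
      rw [← hp] at h1
      exact pv_head_not_space _ _ h1
    have hlp : PySem.Chars.lstrip (x :: t) = x :: t := by
      rw [PySem.Chars.lstrip, List.dropWhile_cons_of_neg (by simp [hx])]
    have hrp : PySem.Chars.rstrip (x :: t) = b := by
      rw [← hstrip, PySem.Chars.strip, hlp]
    obtain ⟨w, hdec, hw⟩ := pv_rstrip_decomp _ _ hrp
    have hcform : c = b ++ (w ++ ' ' :: core) := by rw [← hp, hdec]; simp
    refine ⟨⟨w ++ ' ' :: core, by rw [hcform]⟩, ?_⟩
    have hrest : c.drop b.length = w ++ ' ' :: core := by rw [hcform, List.drop_left]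
    rw [hrest]
    simp only [pvCoreHit]
    have hk : ((w ++ ' ' :: core).length : Int) - (core.length : Int) - 1 = (w.length : Int) := by
      push_cast [List.length_append, List.length_cons]; ring
    rw [hk]
    simp only [Bool.and_eq_true, beq_iff_eq, decide_eq_true_eq, PySem.Chars.endswith_iff]
    refine ⟨⟨⟨?_, ?_⟩, ?_⟩, ?_⟩
    · exact Int.natCast_nonneg _
    · exact ⟨w ++ [' '], by simp⟩
    · rw [PySem.List.pyGet?_natCast]
      rw [List.getElem?_append_right (by omega)]
      simp
    · rw [PySem.List.slice_to _ (Int.natCast_nonneg _)]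
      simp only [Int.toNat_natCast]
      rw [List.take_left]
      simp [(pv_strip_eq_nil_iff w).mpr hw]
  · rintro ⟨⟨rest0, hpre⟩, hhit⟩
    -- hpre : b ++ rest0 = c
    have hrest : c.drop b.length = rest0 := by rw [← hpre, List.drop_left]
    rw [hrest] at hhit
    simp only [pvCoreHit, Bool.and_eq_true, beq_iff_eq, decide_eq_true_eq,
      PySem.Chars.endswith_iff] at hhit
    obtain ⟨⟨⟨hk0, ⟨q, hq⟩⟩, hget⟩, hstrip0⟩ := hhit
    -- hq : q ++ core = rest0
    have hlen : rest0.length = q.length + core.length := by rw [← hq]; simp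
    have hqlen : 1 ≤ q.length := by omega
    set m : Nat := rest0.length - core.length - 1 with hm
    have hkm : (rest0.length : Int) - (core.length : Int) - 1 = (m : Int) := by
      rw [hm]; omega
    rw [hkm] at hget hstrip0
    rw [PySem.List.pyGet?_natCast] at hget
    have hmq : m = q.length - 1 := by omega
    have hgetq : q[m]? = some ' ' := by
      rw [← hq, List.getElem?_append_left (by omega)] at hget
      exact hget
    have hmlt : m < q.length := by omega
    have hqdecomp : q = q.take m ++ [' '] := by
      conv_lhs => rw [← List.take_append_drop m q]
      congr 1
      rw [List.drop_eq_getElem_cons hmlt]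
      have : q.drop (m + 1) = [] := by
        apply List.drop_eq_nil_of_le; omega
      rw [this]
      have : q[m] = ' ' := by
        have := List.getElem?_eq_getElem hmlt
        rw [this] at hgetq; injection hgetq
      rw [this]
    set w : List Char := q.take m with hwdef
    have hwall : w.all PySem.Chars.isspace := by
      rw [PySem.List.slice_to _ (Int.natCast_nonneg _)] at hstrip0
      simp only [Int.toNat_natCast] at hstrip0
      rw [← hq, List.take_append_of_le_length (by omega)] at hstrip0
      exact (pv_strip_eq_nil_iff _).mp hstrip0
    have hrform : rest0 = w ++ ' ' :: core := by
      rw [← hq]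
      conv_lhs => rw [hqdecomp]
      simp
    have hcform : c = b ++ w ++ ' ' :: core := by rw [← hpre, hrform]; simp
    constructor
    · exact ⟨b ++ w, by rw [hcform]⟩
    · have hlenc : c.length - (core.length + 1) = (b ++ w).length := by
        rw [hcform]; simp; omega
      rw [hlenc, hcform]
      rw [show b ++ w ++ ' ' :: core = (b ++ w) ++ ' ' :: core by simp] 
      rw [List.take_left]
      rw [pv_strip_append_ws b w hb hwall]


lemma pv_loop_eq (c b : List Char) (cores : List (List Char))
    (hc : PySem.Chars.strip c = c) (hb : PySem.Chars.strip b = b) :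
    pvLoopA c b (cores.map (' ' :: ·))
    = ((PySem.Chars.startswith c b
          && cores.any (pvCoreHit (PySem.List.slice c (some (b.length : Int)) none)))
        || (PySem.Chars.startswith b c
          && cores.any (pvCoreHit (PySem.List.slice b (some (c.length : Int)) none)))) := by
  induction cores with
  | nil => simp [pvLoopA]
  | cons core cores ih =>
    simp only [List.map_cons, pvLoopA, List.any_cons]
    rw [pv_branch_eq c b core hc hb, pv_branch_eq b c core hb hc, ih]
    cases hX : PySem.Chars.startswith c b <;>
      cases hY : PySem.Chars.startswith b c <;>
        cases h1 : pvCoreHit (PySem.List.slice c (some (b.length : Int)) none) core <;>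
          cases h2 : pvCoreHit (PySem.List.slice b (some (c.length : Int)) none) core <;>
            simp

lemma pv_suffixes_eq : pvSuffixes = pvCores.map (' ' :: ·) := by decide

-- ===== VERDICT (by name: the statement is the Claim_ definition above) =====
theorem is_same_brand_spec : Claim_equal_is_same_brand := by
  intro candidate brand_name _
  unfold Spec_is_same_brand is_same_brand is_same_brand_alt
  set c := PySem.Chars.strip (PySem.Chars.lower candidate.toList) with hcdef
  set b := PySem.Chars.strip (PySem.Chars.lower brand_name.toList) with hbdef
  have hc : PySem.Chars.strip c = c := by rw [hcdef]; exact pv_strip_idem _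
  have hb : PySem.Chars.strip b = b := by rw [hbdef]; exact pv_strip_idem _
  dsimp only
  rw [pv_suffixes_eq, pv_loop_eq c b _ hc hb]
  by_cases h : c = b
  · simp [h]
  · simp only [beq_eq_false_iff_ne.mpr h, pvStripsTo]
    by_cases h1 : PySem.Chars.startswith c b = true <;>
      by_cases h2 : PySem.Chars.startswith b c = true <;> simp [h1, h2]
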